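-- pv_equiv track=rewrite | github.com/llewpriimak/class_work | CS313E/Class Assignments/InterestingDrink.py | find_purchase_options
-- ===== SOURCE A (Python) =====
-- def find_purchase_options(prices, money):
--
--     prices.sort()
--     can_get = []
--     for cash in money:
--         total = 0
--         for price in prices:
--             if cash >= price:
--                 total += 1
--             else:
--                 break
--         can_get.append(total)
--     return can_get
-- ===== SOURCE B (Python) =====
-- def _count_le(prices, cash):
--     # binary search: number of elements of sorted `prices` that are <= cash
--     lo, hi = 0, len(prices)
--     while lo < hi:
--         mid = (lo + hi) // 2
--         if prices[mid] <= cash: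
--             lo = mid + 1
--         else:
--             hi = mid
--     return lo
--
--
-- def find_purchase_options(prices, money):
--     prices.sort()
--     return [_count_le(prices, cash) for cash in money]
-- ===== Notes on version B (the rewrite author's own statement) =====
-- stated objective: faster
-- what changed: Replaces the per-query linear scan of the sorted price list with a per-query binary search (hand-written bisect_right), so each of the m queries costs O(log n) instead of O(n).
import Mathlib
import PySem

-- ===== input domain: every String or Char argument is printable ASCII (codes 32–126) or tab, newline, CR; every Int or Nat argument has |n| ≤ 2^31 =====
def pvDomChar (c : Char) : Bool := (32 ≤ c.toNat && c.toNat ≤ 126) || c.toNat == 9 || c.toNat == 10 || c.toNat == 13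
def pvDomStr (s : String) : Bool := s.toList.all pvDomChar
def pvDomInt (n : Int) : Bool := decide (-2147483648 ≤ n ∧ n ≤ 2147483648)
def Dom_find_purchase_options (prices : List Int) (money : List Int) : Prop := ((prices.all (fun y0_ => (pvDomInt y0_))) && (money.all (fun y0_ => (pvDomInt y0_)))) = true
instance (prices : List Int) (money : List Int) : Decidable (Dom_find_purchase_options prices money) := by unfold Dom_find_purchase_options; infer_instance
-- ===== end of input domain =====

-- B replaces A's per-query linear scan of the sorted prices with a per-query binary search.
-- Note: both Pythons sort `prices` in place (prices.sort()); the theorems below are about the return value.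

-- ===== PORT A =====
-- inner loop of A: `total = 0; for price in prices: if cash >= price: total += 1 else: break`
def pvInnerA (prices : List Int) (cash : Int) (total : Int) : Int :=
  match prices with
  | [] => total
  | p :: r => if cash ≥ p then pvInnerA r cash (total + 1) else total

def find_purchase_options (prices : List Int) (money : List Int) : List Int :=
  let sp := PySem.List.sorted prices (fun x => x) false   -- prices.sort()
  money.foldl (fun can_get cash => can_get ++ [pvInnerA sp cash 0]) []

-- ===== PORT B =====
-- hand-written binary search of Source B: while lo < hi: mid = (lo+hi)//2; …  (lo, hi are nonnegative,
-- so Python's (lo+hi)//2 is exactly Nat division; prices[mid] is always in range, ported as getD)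
def pvCountLe (prices : List Int) (cash : Int) (lo hi : Nat) : Nat :=
  if _h : lo < hi then
    let mid := (lo + hi) / 2
    if prices.getD mid 0 ≤ cash then pvCountLe prices cash (mid + 1) hi
    else pvCountLe prices cash lo mid
  else lo
termination_by hi - lo
decreasing_by all_goals omega

def find_purchase_options_alt (prices : List Int) (money : List Int) : List Int :=
  let sp := PySem.List.sorted prices (fun x => x) false   -- prices.sort()
  money.map (fun cash => ((pvCountLe sp cash 0 sp.length : Nat) : Int))

-- ===== PRECONDITION & SPEC =====
def Spec_find_purchase_options (prices : List Int) (money : List Int) (out : List Int) : Prop := out = find_purchase_options_alt prices money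
instance (prices : List Int) (money : List Int) (out : List Int) : Decidable (Spec_find_purchase_options prices money out) := by unfold Spec_find_purchase_options; infer_instance

-- ===== CLAIM =====
def Claim_equal_find_purchase_options : Prop := ∀ (prices : List Int) (money : List Int), Dom_find_purchase_options prices money → Spec_find_purchase_options prices money (find_purchase_options prices money)

-- ===== LEMMAS AND PROOFS =====
-- the common anchor: number of leading elements ≤ cash
def pvN (xs : List Int) (c : Int) : Nat :=
  match xs with
  | [] => 0
  | p :: r => if p ≤ c then pvN r c + 1 else 0

lemma pvInnerA_eq_N (xs : List Int) (c : Int) : ∀ t : Int, pvInnerA xs c t = t + (pvN xs c : Int) := by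
  induction xs with
  | nil => intro t; simp [pvInnerA, pvN]
  | cons p r ih =>
      intro t
      simp only [pvInnerA, pvN, ge_iff_le]
      by_cases h : p ≤ c
      · simp only [h, if_true, ih]; push_cast; ring
      · simp [h]

lemma pvN_le (xs : List Int) (c : Int) : pvN xs c ≤ xs.length := by
  induction xs with
  | nil => simp [pvN]
  | cons p r ih => simp only [pvN]; split <;> simp_all

lemma pvN_below (xs : List Int) (c : Int) : ∀ j, j < pvN xs c → xs.getD j 0 ≤ c := by
  induction xs with
  | nil => simp [pvN]
  | cons p r ih =>
      intro j hj
      simp only [pvN] at hj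
      by_cases h : p ≤ c
      · simp only [h, if_true] at hj
        cases j with
        | zero => simpa using h
        | succ k => simpa using ih k (by omega)
      · simp [h] at hj

lemma pvN_above (xs : List Int) (c : Int) (hs : xs.Pairwise (· ≤ ·)) :
    ∀ j, pvN xs c ≤ j → j < xs.length → c < xs.getD j 0 := by
  induction xs with
  | nil => simp
  | cons p r ih =>
      intro j hj hlen
      rcases List.pairwise_cons.mp hs with ⟨hp, hr⟩
      simp only [pvN] at hj
      by_cases h : p ≤ c
      · simp only [h, if_true] at hj
        cases j with
        | zero => omega
        | succ k => simpa using ih hr k (by omega) (by simpa using hlen)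
      · cases j with
        | zero => simpa using by omega
        | succ k =>
            have hk : k < r.length := by simpa using hlen
            have : p ≤ r.getD k 0 := by
              have := hp (r[k]) (List.getElem_mem hk)
              simpa [List.getD_eq_getElem?_getD, List.getElem?_eq_getElem hk] using this
            simp only [List.getD_cons_succ]
            omega

lemma pvCountLe_eq_N (xs : List Int) (c : Int) (hs : xs.Pairwise (· ≤ ·)) :
    ∀ lo hi, lo ≤ pvN xs c → pvN xs c ≤ hi → hi ≤ xs.length → pvCountLe xs c lo hi = pvN xs c := by
  intro lo hi
  induction hlh : hi - lo using Nat.strong_induction_on generalizing lo hi with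
  | _ d ih =>
    intro hlo hhi hlen
    unfold pvCountLe
    by_cases h : lo < hi
    · simp only [h, dif_pos]
      set mid := (lo + hi) / 2 with hmid
      have hm1 : lo ≤ mid := by omega
      have hm2 : mid < hi := by omega
      by_cases hx : xs.getD mid 0 ≤ c
      · have hmidN : mid < pvN xs c := by
          by_contra hcon
          exact absurd hx (not_le.mpr (pvN_above xs c hs mid (by omega) (by omega)))
        simp only [hx, if_true]
        exact ih (hi - (mid + 1)) (by omega) (mid + 1) hi rfl (by omega) hhi hlen
      · have hmidN : pvN xs c ≤ mid := by
          by_contra hcon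
          exact hx (pvN_below xs c mid (by omega))
        simp only [hx, if_false]
        exact ih (mid - lo) (by omega) lo mid rfl hlo hmidN (by omega)
    · simp only [h, dif_neg, not_false_iff]
      omega

lemma pvInner_eq_count (xs : List Int) (c : Int) (hs : xs.Pairwise (· ≤ ·)) :
    pvInnerA xs c 0 = ((pvCountLe xs c 0 xs.length : Nat) : Int) := by
  rw [pvInnerA_eq_N, pvCountLe_eq_N xs c hs 0 xs.length (Nat.zero_le _) (pvN_le xs c) le_rfl]
  simp

-- ===== VERDICT =====
theorem find_purchase_options_spec : Claim_equal_find_purchase_options := by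
  intro prices money _
  unfold Spec_find_purchase_options find_purchase_options find_purchase_options_alt
  rw [PySem.List.foldl_append_singleton_eq_map, List.nil_append]
  apply List.map_congr_left
  intro cash _
  exact pvInner_eq_count _ cash (by simpa using PySem.List.sorted_pairwise prices (fun x => x))
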